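-- pv_equiv track=rewrite | github.com/Aline1029/webupdate_smoke | jfrog_artifactory_pro.py | __prepare_file_inner
-- ===== SOURCE A (Python) =====
-- def __prepare_file_inner(file_list):
--     file_dict = {}
--     for ele in file_list:
--         x = ".".join(ele.split(".")[:-2])  # 唯一文件名
--         y = ".".join(ele.split(".")[-2:])  # 版本号
--         if x in file_dict.keys():
--             if y > file_dict[x]:
--                 file_dict[x] = y
--             else:
--                 continue
--         else:
--             file_dict[x] = y
--     return file_dict
-- ===== SOURCE B (Python) =====
-- def __prepare_file_inner(file_list):
--     # Collect all version strings per basename first, then reduce each group with max.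
--     groups = {}
--     for ele in file_list:
--         parts = ele.split(".")
--         x = ".".join(parts[:-2])
--         y = ".".join(parts[-2:])
--         groups.setdefault(x, []).append(y)
--     return {x: max(vs) for x, vs in groups.items()}
-- ===== Notes on version B (the rewrite author's own statement) =====
-- stated objective: alternative
-- what changed: Replaces the single streaming pass that maintains a running max per key in the dict with a collect-then-reduce decomposition: one pass groups all version strings per basename into lists, then each group is reduced with max; first-encounter key order and string comparison are preserved.
import Mathlib
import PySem

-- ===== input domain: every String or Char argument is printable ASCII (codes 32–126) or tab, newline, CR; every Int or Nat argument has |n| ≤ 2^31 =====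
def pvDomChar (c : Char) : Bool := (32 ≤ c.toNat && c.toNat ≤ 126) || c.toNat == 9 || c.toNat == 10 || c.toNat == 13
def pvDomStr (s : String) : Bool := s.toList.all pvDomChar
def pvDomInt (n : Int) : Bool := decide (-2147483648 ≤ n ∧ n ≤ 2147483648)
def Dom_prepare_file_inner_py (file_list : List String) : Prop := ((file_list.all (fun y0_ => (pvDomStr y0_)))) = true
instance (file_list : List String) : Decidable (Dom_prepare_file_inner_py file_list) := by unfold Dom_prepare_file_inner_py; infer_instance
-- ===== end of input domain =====

-- B re-implements A's streaming running-max dict as collect-all-versions-per-basename then reduce each group with max (alternative decomposition, same cost).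

-- ===== PORT A =====
-- x = ".".join(ele.split(".")[:-2])   (shared by both Pythons, computed the same way in each loop body;
-- split? is none only for sep = "", so the .getD [] branch is unreachable)
def pvBase (ele : String) : String :=
  PySem.Str.join "." (PySem.List.slice ((PySem.Str.split? ele ".").getD []) none (some (-2)))
-- y = ".".join(ele.split(".")[-2:])
def pvVer (ele : String) : String :=
  PySem.Str.join "." (PySem.List.slice ((PySem.Str.split? ele ".").getD []) (some (-2)) none)

-- the body of A's for-loop (if x in dict: keep the larger; else insert)
def pvStepA (d : PySem.Dict String String) (ele : String) : PySem.Dict String String :=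
  let x := pvBase ele
  let y := pvVer ele
  match d.get? x with
  | some v => if v < y then d.insert x y else d
  | none => d.insert x y

def prepare_file_inner_py (file_list : List String) : List (String × String) :=
  (file_list.foldl pvStepA PySem.Dict.empty).items

-- ===== PORT B =====
-- max(vs); vs is never empty where B calls it, so the none branch is unreachable
def pvMaxList (vs : List String) : String :=
  match PySem.List.max? vs (fun v => v) with
  | some m => m
  | none => ""

def prepare_file_inner_py_alt (file_list : List String) : List (String × String) :=
  let groups := file_list.foldl
      (fun g ele => g.modify (pvBase ele) [] (fun vs => vs ++ [pvVer ele]))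
      PySem.Dict.empty
  groups.items.map (fun p => (p.1, pvMaxList p.2))

-- ===== PRECONDITION & SPEC =====
def Spec_prepare_file_inner_py (file_list : List String) (out : List (String × String)) : Prop := out = prepare_file_inner_py_alt file_list
instance (file_list : List String) (out : List (String × String)) : Decidable (Spec_prepare_file_inner_py file_list out) := by unfold Spec_prepare_file_inner_py; infer_instance

-- ===== CLAIM (what is proved, stated in full; the proofs are below) =====
def Claim_equal_prepare_file_inner_py : Prop := ∀ (file_list : List String), Dom_prepare_file_inner_py file_list → Spec_prepare_file_inner_py file_list (prepare_file_inner_py file_list)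

-- ===== LEMMAS AND PROOFS =====

-- running max over a list, starting from an optional current best (what A's loop maintains per key)
def pvOmax (o : Option String) (vs : List String) : Option String :=
  vs.foldl (fun a y => some (a.elim y (fun w => max w y))) o

theorem pvOmax_some (w : String) (vs : List String) : pvOmax (some w) vs = some (vs.foldl max w) := by
  induction vs generalizing w with
  | nil => rfl
  | cons v t ih => simp only [pvOmax, List.foldl_cons, Option.elim] at *; exact ih _

theorem pvOmax_cons (o : Option String) (y : String) (t : List String) :
    pvOmax o (y :: t) = pvOmax (some (o.elim y (fun w => max w y))) t := rfl

-- one step of A's loop, characterised on lookups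
theorem pvStepA_get? (d : PySem.Dict String String) (e k : String) :
    (pvStepA d e).get? k =
      if k = pvBase e then some ((d.get? (pvBase e)).elim (pvVer e) (fun w => max w (pvVer e)))
      else d.get? k := by
  unfold pvStepA
  cases hg : d.get? (pvBase e) with
  | none =>
    simp only [hg, Option.elim]
    by_cases h : k = pvBase e
    · subst h; simp [PySem.Dict.get?_insert_self]
    · simp [h, PySem.Dict.get?_insert_of_ne _ _ h]
  | some v =>
    simp only [hg, Option.elim]
    by_cases hv : v < pvVer e
    · simp only [if_pos hv]
      by_cases h : k = pvBase e
      · subst h; simp [PySem.Dict.get?_insert_self, max_eq_right (le_of_lt hv)]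
      · simp [h, PySem.Dict.get?_insert_of_ne _ _ h]
    · simp only [if_neg hv]
      by_cases h : k = pvBase e
      · subst h; simp [hg, max_eq_left (le_of_not_gt hv)]
      · simp [h]

-- one step of A's loop, characterised on keys
theorem pvStepA_keys (d : PySem.Dict String String) (e : String) :
    (pvStepA d e).keys = PySem.Set.add d.keys (pvBase e) := by
  unfold pvStepA
  cases hg : d.get? (pvBase e) with
  | none =>
    have hc : d.contains (pvBase e) = false := by
      rw [PySem.Dict.contains_eq_isSome_get?, hg]; rfl
    have hm : pvBase e ∉ d.keys := by
      intro hmem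
      rw [← PySem.Dict.contains_iff_mem_keys] at hmem
      rw [hc] at hmem; exact Bool.false_ne_true hmem
    simp only [hg]
    rw [PySem.Dict.keys_insert_of_not_contains _ _ hc, PySem.Set.add_of_not_mem hm]
  | some v =>
    have hc : d.contains (pvBase e) = true := by
      rw [PySem.Dict.contains_eq_isSome_get?, hg]; rfl
    have hm : pvBase e ∈ d.keys := (PySem.Dict.contains_iff_mem_keys _ _).mp hc
    simp only [hg]
    by_cases hv : v < pvVer e
    · rw [if_pos hv, PySem.Dict.keys_insert_of_contains _ _ hc, PySem.Set.add_of_mem hm]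
    · rw [if_neg hv, PySem.Set.add_of_mem hm]

theorem get?_foldA (l : List String) (d : PySem.Dict String String) (k : String) :
    ((l.foldl pvStepA d).get? k) = pvOmax (d.get? k) ((l.filter (fun e => pvBase e == k)).map pvVer) := by
  induction l generalizing d with
  | nil => rfl
  | cons e t ih =>
    rw [List.foldl_cons, ih, pvStepA_get?]
    by_cases h : pvBase e = k
    · subst h
      simp only [List.filter_cons, beq_self_eq_true, if_true, List.map_cons, pvOmax_cons]
    · have h' : ¬ k = pvBase e := fun hh => h hh.symm
      have hb : (pvBase e == k) = false := by simp [h]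
      simp only [List.filter_cons, hb, if_neg h', Bool.false_eq_true, if_false]

theorem keys_foldA (l : List String) (d : PySem.Dict String String) :
    (l.foldl pvStepA d).keys = PySem.Set.update d.keys (l.map pvBase) := by
  induction l generalizing d with
  | nil => rfl
  | cons e t ih =>
    rw [List.foldl_cons, ih, pvStepA_keys, List.map_cons, PySem.Set.update_cons]

theorem pv_main (file_list : List String) :
    prepare_file_inner_py file_list = prepare_file_inner_py_alt file_list := by
  show (file_list.foldl pvStepA PySem.Dict.empty).items
      = (file_list.foldl
          (fun g ele => g.modify (pvBase ele) [] (fun vs => vs ++ [pvVer ele]))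
          PySem.Dict.empty).items.map (fun p => (p.1, pvMaxList p.2))
  set dA := file_list.foldl pvStepA PySem.Dict.empty with hdA
  set dB := file_list.foldl
      (fun g ele => g.modify (pvBase ele) [] (fun vs => vs ++ [pvVer ele]))
      PySem.Dict.empty with hdB
  have hkA : dA.keys = PySem.Set.ofList (file_list.map pvBase) := by
    rw [hdA, keys_foldA]
    simp [PySem.Dict.keys_empty, PySem.Set.update_nil_left]
  have hkB : dB.keys = PySem.Set.ofList (file_list.map pvBase) := by
    rw [hdB, PySem.Dict.keys_foldl_modify_key]
    simp [PySem.Dict.keys_empty, PySem.Set.update_nil_left]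
  have hndA : dA.keys.Nodup := by rw [hkA]; exact PySem.Set.nodup_ofList _
  have hndB : dB.keys.Nodup := by rw [hkB]; exact PySem.Set.nodup_ofList _
  rw [PySem.Dict.items_eq_map_keys dA hndA "", PySem.Dict.items_eq_map_keys dB hndB []]
  rw [hkA, hkB, List.map_map]
  apply List.map_congr_left
  intro k hk
  have hkmem : k ∈ file_list.map pvBase := (PySem.Set.mem_ofList _ _).mp hk
  obtain ⟨e, he, hke⟩ := List.mem_map.mp hkmem
  have hefil : e ∈ file_list.filter (fun x => pvBase x == k) := by
    rw [List.mem_filter]; exact ⟨he, by simp [hke]⟩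
  have hBgetD : dB.getD k [] = (file_list.filter (fun x => pvBase x == k)).map pvVer := by
    rw [hdB]
    have hmap : file_list.foldl
        (fun g ele => g.modify (pvBase ele) [] (fun vs => vs ++ [pvVer ele]))
        PySem.Dict.empty
        = (file_list.map (fun e => (pvBase e, pvVer e))).foldl
            (fun d p => d.modify p.1 [] (fun vs => vs ++ [p.2])) PySem.Dict.empty := by
      rw [List.foldl_map]
    rw [hmap, PySem.Dict.getD_foldl_modify_append]
    simp [PySem.Dict.getD_empty, List.filter_map, Function.comp_def]
  cases hfil : (file_list.filter (fun x => pvBase x == k)).map pvVer with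
  | nil =>
    exfalso
    have : pvVer e ∈ (file_list.filter (fun x => pvBase x == k)).map pvVer :=
      List.mem_map.mpr ⟨e, hefil, rfl⟩
    rw [hfil] at this; exact List.not_mem_nil this
  | cons v t =>
    have hAget : dA.get? k = some (t.foldl max v) := by
      rw [hdA, get?_foldA, PySem.Dict.get?_empty, hfil, pvOmax_cons]
      simp only [Option.elim]
      exact pvOmax_some v t
    simp only [Function.comp]
    congr 1
    rw [PySem.Dict.getD_eq_get?_getD, hAget]
    rw [hBgetD, hfil]
    unfold pvMaxList
    rw [PySem.List.max?_id_cons]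
    rfl

-- ===== VERDICT (by name: the statement is the Claim_ definition above) =====
theorem prepare_file_inner_py_spec : Claim_equal_prepare_file_inner_py := by
  intro fl _
  unfold Spec_prepare_file_inner_py
  exact pv_main fl
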